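-- pv_equiv track=rewrite | github.com/LeInS-dev/owasp-wstg-framework | 08-Error_Handling/error_handling_tester.py | _contains_sensitive_info
-- ===== SOURCE A (Python) =====
-- def _contains_sensitive_info(content):
--     """Check if response contains sensitive information"""
--     sensitive_patterns = [
--         'password',
--         'secret',
--         'api_key',
--         'private_key',
--         'database',
--         'username:',
--         'root:',
--         'admin:',
--         'config',
--         'connection string',
--         'server=',
--         'user id='
--     ]
--
--     content_lower = content.lower()
--     for pattern in sensitive_patterns:
--         if pattern in content_lower:
--             return True
--     return False
-- ===== SOURCE B (Python) =====
-- _SENSITIVE_PATTERNS = (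
--     'password', 'secret', 'api_key', 'private_key', 'database',
--     'username:', 'root:', 'admin:', 'config', 'connection string',
--     'server=', 'user id=')
--
--
-- def _contains_sensitive_info(content):
--     """Single left-to-right sweep over the lowercased content: at each
--     position, test whether any sensitive pattern starts exactly there."""
--     cl = content.lower()
--     return any(cl.startswith(p, i)
--                for i in range(len(cl))
--                for p in _SENSITIVE_PATTERNS)
-- ===== Notes on version B (the rewrite author's own statement) =====
-- stated objective: alternative
-- what changed: A scans the whole content once per pattern (pattern-outer loop of substring searches); B lowercases once and makes a single position-outer sweep over the content, testing at each index whether any pattern starts there.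
import Mathlib
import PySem

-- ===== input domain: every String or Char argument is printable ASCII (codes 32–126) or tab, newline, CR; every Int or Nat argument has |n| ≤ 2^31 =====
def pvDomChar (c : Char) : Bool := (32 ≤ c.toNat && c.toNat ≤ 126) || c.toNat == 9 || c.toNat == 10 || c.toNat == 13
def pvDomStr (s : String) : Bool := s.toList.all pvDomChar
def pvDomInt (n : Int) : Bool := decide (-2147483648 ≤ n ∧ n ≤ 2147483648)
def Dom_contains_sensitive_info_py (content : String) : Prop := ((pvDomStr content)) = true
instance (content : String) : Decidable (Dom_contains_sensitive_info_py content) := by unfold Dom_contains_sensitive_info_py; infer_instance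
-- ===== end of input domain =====

-- B replaces A's pattern-outer loop of whole-content substring searches by one
-- position-outer sweep of the lowercased content (alternative decomposition, same cost).

-- ===== PORT A =====
def pvPatternsA : List String :=
  ["password", "secret", "api_key", "private_key", "database", "username:",
   "root:", "admin:", "config", "connection string", "server=", "user id="]

-- 'for pattern in patterns: if pattern in content_lower: return True' / 'return False'
def pvAScan : List String → String → Bool
  | [], _ => false
  | p :: ps, cl => if PySem.Str.isIn p cl then true else pvAScan ps cl

def contains_sensitive_info_py (content : String) : Bool :=
  pvAScan pvPatternsA (PySem.Str.lower content)

-- ===== PORT B =====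
def pvPatternsB : List String :=
  ["password", "secret", "api_key", "private_key", "database", "username:",
   "root:", "admin:", "config", "connection string", "server=", "user id="]

-- 'any(cl.startswith(p, i) for i in range(len(cl)) for p in _SENSITIVE_PATTERNS)';
-- cl.startswith(p, i) is ported exactly as 'p is a prefix of cl from index i'.
def contains_sensitive_info_py_alt (content : String) : Bool :=
  let cl := (PySem.Str.lower content).toList
  (List.range cl.length).any fun i =>
    pvPatternsB.any fun p => PySem.Chars.startswith (cl.drop i) p.toList

-- ===== PRECONDITION & SPEC =====
def Spec_contains_sensitive_info_py (content : String) (out : Bool) : Prop := out = contains_sensitive_info_py_alt content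
instance (content : String) (out : Bool) : Decidable (Spec_contains_sensitive_info_py content out) := by unfold Spec_contains_sensitive_info_py; infer_instance

-- ===== CLAIM (what is proved, stated in full; the proofs are below) =====
def Claim_equal_contains_sensitive_info_py : Prop := ∀ (content : String), Dom_contains_sensitive_info_py content → Spec_contains_sensitive_info_py content (contains_sensitive_info_py content)

-- ===== LEMMAS AND PROOFS =====

theorem pvAScan_eq_any (ps : List String) (cl : String) :
    pvAScan ps cl = ps.any fun p => PySem.Str.isIn p cl := by
  induction ps with
  | nil => rfl
  | cons p ps ih => simp [pvAScan, ih]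

theorem pv_infix_iff_exists_drop {α : Type} (sub s : List α) (h : sub ≠ []) :
    sub <:+: s ↔ ∃ i < s.length, sub <+: s.drop i := by
  constructor
  · rintro ⟨t, u, rfl⟩
    refine ⟨t.length, ?_, ?_⟩
    · have : 0 < sub.length := List.length_pos_iff.mpr h
      simp [List.length_append]; omega
    · rw [List.append_assoc, List.drop_left]
      exact ⟨u, rfl⟩
  · rintro ⟨i, _, hp⟩
    exact hp.isInfix.trans (List.drop_suffix i s).isInfix

theorem pvPatterns_nonempty : ∀ p ∈ pvPatternsA, p.toList ≠ [] := by decide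

-- ===== VERDICT (by name: the statement is the Claim_ definition above) =====
theorem contains_sensitive_info_py_spec : Claim_equal_contains_sensitive_info_py := by
  intro content _
  unfold Spec_contains_sensitive_info_py contains_sensitive_info_py contains_sensitive_info_py_alt
  rw [pvAScan_eq_any, Bool.eq_iff_iff]
  have hpats : pvPatternsB = pvPatternsA := rfl
  simp only [hpats, List.any_eq_true, List.mem_range, PySem.Str.isIn_iff_infix,
    PySem.Chars.startswith_iff]
  constructor
  · rintro ⟨p, hp, hin⟩
    obtain ⟨i, hi, hpre⟩ :=
      (pv_infix_iff_exists_drop _ _ (pvPatterns_nonempty p hp)).mp hin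
    exact ⟨i, hi, p, hp, hpre⟩
  · rintro ⟨i, hi, p, hp, hpre⟩
    exact ⟨p, hp, (pv_infix_iff_exists_drop _ _ (pvPatterns_nonempty p hp)).mpr ⟨i, hi, hpre⟩⟩
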